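-- pv_equiv track=rewrite | github.com/nheist/CaLiGraph | evaluate_se_tagging.py | _map_entity_chunk_to_binary_labels
-- ===== SOURCE A (Python) =====
-- def _map_entity_chunk_to_binary_labels(entity_chunk: list) -> list:
--     labels = []
--     for idx, ent in enumerate(entity_chunk):
--         if ent is None:
--             labels.append(0)
--         elif idx == 0 or ent != entity_chunk[idx-1]:
--             labels.append(1)
--         else:
--             labels.append(2)
--     return labels
-- ===== SOURCE B (Python) =====
-- from itertools import groupby
--
-- def _map_entity_chunk_to_binary_labels(entity_chunk: list) -> list:
--     labels = []
--     for key, group in groupby(entity_chunk):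
--         n = sum(1 for _ in group)
--         if key is None:
--             labels.extend([0] * n)
--         else:
--             labels.append(1)
--             labels.extend([2] * (n - 1))
--     return labels
-- ===== Notes on version B (the rewrite author's own statement) =====
-- stated objective: alternative
-- what changed: Replaces the element-wise look-back comparison with an itertools.groupby pass over maximal runs of equal elements, emitting each run's labels in bulk.
import Mathlib
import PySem

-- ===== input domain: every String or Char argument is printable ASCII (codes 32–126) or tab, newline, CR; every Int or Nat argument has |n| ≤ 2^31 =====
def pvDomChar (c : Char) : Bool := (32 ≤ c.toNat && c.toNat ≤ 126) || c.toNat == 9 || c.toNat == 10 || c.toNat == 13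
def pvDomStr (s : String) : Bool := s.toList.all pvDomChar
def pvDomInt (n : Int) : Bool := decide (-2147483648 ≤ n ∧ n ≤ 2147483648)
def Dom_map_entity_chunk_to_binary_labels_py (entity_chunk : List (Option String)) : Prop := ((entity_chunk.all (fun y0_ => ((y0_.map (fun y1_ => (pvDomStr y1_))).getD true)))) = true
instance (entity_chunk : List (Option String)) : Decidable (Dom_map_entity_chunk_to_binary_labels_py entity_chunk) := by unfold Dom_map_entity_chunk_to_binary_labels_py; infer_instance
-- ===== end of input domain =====

-- B replaces A's element-wise look-back comparison by a groupby-style pass over maximal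
-- runs of equal consecutive elements (objective: alternative decomposition, same cost).

-- ===== PORT A =====
-- the loop body: for idx, ent in enumerate(entity_chunk): append 0 / 1 / 2
def pvALoop (chunk : List (Option String)) (labels : List Int) (idx : Nat) :
    List (Option String) → List Int
  | [] => labels
  | ent :: rest =>
    let lab : Int :=
      match ent with
      | none => 0
      | some _ => if idx = 0 ∨ ent ≠ chunk.getD (idx - 1) none then 1 else 2
    pvALoop chunk (labels ++ [lab]) (idx + 1) rest

def map_entity_chunk_to_binary_labels_py (entity_chunk : List (Option String)) : List Int :=
  pvALoop entity_chunk [] 0 entity_chunk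

-- ===== PORT B =====
-- itertools.groupby: the list of (key, run length) for maximal runs of equal elements
def pvRuns : List (Option String) → List (Option String × Nat)
  | [] => []
  | x :: xs =>
    (x, (xs.takeWhile (· = x)).length + 1) :: pvRuns (xs.dropWhile (· = x))
  termination_by l => l.length
  decreasing_by
    simp only [List.length_cons]
    exact Nat.lt_succ_of_le (List.length_dropWhile_le _ _)

def map_entity_chunk_to_binary_labels_py_alt (entity_chunk : List (Option String)) : List Int :=
  (pvRuns entity_chunk).flatMap (fun kn =>
    match kn.1 with
    | none => List.replicate kn.2 (0 : Int)
    | some _ => (1 : Int) :: List.replicate (kn.2 - 1) (2 : Int))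

-- ===== PRECONDITION & SPEC =====
def Spec_map_entity_chunk_to_binary_labels_py (entity_chunk : List (Option String)) (out : List Int) : Prop := out = map_entity_chunk_to_binary_labels_py_alt entity_chunk
instance (entity_chunk : List (Option String)) (out : List Int) : Decidable (Spec_map_entity_chunk_to_binary_labels_py entity_chunk out) := by unfold Spec_map_entity_chunk_to_binary_labels_py; infer_instance

-- ===== CLAIM (what is proved, stated in full; the proofs are below) =====
def Claim_equal_map_entity_chunk_to_binary_labels_py : Prop := ∀ (entity_chunk : List (Option String)), Dom_map_entity_chunk_to_binary_labels_py entity_chunk → Spec_map_entity_chunk_to_binary_labels_py entity_chunk (map_entity_chunk_to_binary_labels_py entity_chunk)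

-- ===== LEMMAS AND PROOFS =====

-- label of element x given the previous element (none = no previous element)
def pvLab (prev : Option (Option String)) (x : Option String) : Int :=
  match x with
  | none => 0
  | some _ => if prev = some x then 2 else 1

-- reference: one left-to-right pass carrying the previous element
def pvSpec (prev : Option (Option String)) : List (Option String) → List Int
  | [] => []
  | x :: xs => pvLab prev x :: pvSpec (some x) xs

lemma pvALoop_eq (chunk : List (Option String)) :
    ∀ (rest : List (Option String)) (labels : List Int) (idx : Nat),
      rest = chunk.drop idx →
      pvALoop chunk labels idx rest =
        labels ++ pvSpec (if idx = 0 then none else some (chunk.getD (idx - 1) none)) rest := by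
  intro rest
  induction rest with
  | nil => intro labels idx _; simp [pvALoop, pvSpec]
  | cons ent rest' ih =>
    intro labels idx h
    have hlt : idx < chunk.length := by
      by_contra hge
      rw [List.drop_eq_nil_of_le (Nat.le_of_not_lt hge)] at h
      exact List.cons_ne_nil _ _ h
    have hget : chunk.getD idx none = ent := by
      have hd := List.drop_eq_getElem_cons hlt
      rw [hd] at h
      have h1 : ent = chunk[idx] := (List.cons.injEq .. ▸ h).1
      simp [List.getD, List.getElem?_eq_getElem hlt, h1]
    have hrest : rest' = chunk.drop (idx + 1) := by
      have := List.drop_eq_getElem_cons hlt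
      rw [this] at h
      exact (List.cons.injEq .. ▸ h).2
    simp only [pvALoop]
    rw [ih _ (idx + 1) hrest]
    simp only [Nat.add_sub_cancel, hget, List.append_assoc, List.singleton_append]
    congr 1
    rw [pvSpec]
    congr 1
    · cases ent with
      | none => simp [pvLab]
      | some s =>
        simp only [pvLab]
        by_cases h0 : idx = 0
        · simp [h0]
        · simp only [h0, false_or]
          by_cases he : chunk.getD (idx - 1) none = some s
          · simp [List.getD] at he
            simp [List.getD, he]
          · simp [List.getD] at he
            simp [List.getD, he, Ne.symm he]

-- after a run head x, every equal element gets label pvLab (some x) x and prev stays some x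
lemma pvSpec_run (x : Option String) :
    ∀ (t d : List (Option String)), (∀ y ∈ t, y = x) →
      pvSpec (some x) (t ++ d) = List.replicate t.length (pvLab (some x) x) ++ pvSpec (some x) d := by
  intro t
  induction t with
  | nil => simp
  | cons y t' ih =>
    intro d hall
    have hy : y = x := hall y (List.mem_cons_self ..)
    subst hy
    simp only [List.cons_append, pvSpec, List.length_cons, List.replicate_succ, List.cons_append]
    rw [ih d (fun z hz => hall z (List.mem_cons_of_mem _ hz))]

lemma pvB_eq_spec :
    ∀ (l : List (Option String)) (prev : Option (Option String)),
      (∀ x xs, l = x :: xs → prev ≠ some x) →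
      (pvRuns l).flatMap (fun kn =>
        match kn.1 with
        | none => List.replicate kn.2 (0 : Int)
        | some _ => (1 : Int) :: List.replicate (kn.2 - 1) (2 : Int)) = pvSpec prev l := by
  intro l
  induction l using pvRuns.induct with
  | case1 => intro prev _; simp [pvRuns, pvSpec]
  | case2 x xs ih =>
    intro prev hprev
    have hne : prev ≠ some x := hprev x xs rfl
    have htake : ∀ y ∈ xs.takeWhile (fun a => decide (a = x)), y = x := by
      intro y hy
      exact of_decide_eq_true (List.mem_takeWhile_imp (p := fun a => decide (a = x)) hy)
    have hdropcond : ∀ z zs, xs.dropWhile (fun a => decide (a = x)) = z :: zs →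
        (some x : Option (Option String)) ≠ some z := by
      intro z zs hz hcontra
      have h2 : (xs.dropWhile (fun a => decide (a = x))) ≠ [] := by simp [hz]
      have hhd := List.head_dropWhile_not (p := fun a => decide (a = x)) (l := xs) h2
      simp only [hz, List.head_cons, decide_eq_false_iff_not] at hhd
      exact hhd (Option.some.inj hcontra).symm
    rw [pvRuns]
    simp only [List.flatMap_cons]
    rw [ih (some x) hdropcond]
    have hxs : xs = xs.takeWhile (fun a => decide (a = x)) ++ xs.dropWhile (fun a => decide (a = x)) :=
      (List.takeWhile_append_dropWhile ..).symm
    conv_rhs => rw [pvSpec, hxs]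
    rw [pvSpec_run x _ _ htake]
    cases x with
    | none =>
      simp only [pvLab, List.replicate_succ, List.cons_append]
    | some s =>
      simp [pvLab, hne]

-- ===== VERDICT (by name: the statement is the Claim_ definition above) =====
theorem map_entity_chunk_to_binary_labels_py_spec : Claim_equal_map_entity_chunk_to_binary_labels_py := by
  intro entity_chunk _
  unfold Spec_map_entity_chunk_to_binary_labels_py
  unfold map_entity_chunk_to_binary_labels_py map_entity_chunk_to_binary_labels_py_alt
  rw [pvALoop_eq entity_chunk entity_chunk [] 0 rfl,
      pvB_eq_spec entity_chunk none (fun _ _ _ => by simp)]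
  simp
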